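-- pv_equiv track=rewrite | github.com/faizan-az02/dsa_problems | p6_max_fish.py | find_max_fish
-- ===== SOURCE A (Python) =====
-- def find_max_fish(grid):
--
--     m, n = len(grid), len(grid[0])
--
--     visited = [[False] * n for _ in range(m)]
--
--     def dfs(r, c):
--
--         if r < 0 or r >= m or c < 0 or c >= n:
--
--             return 0
--
--         if visited[r][c] or grid[r][c] == 0:
--
--             return 0
--
--         visited[r][c] = True
--
--         fish = grid[r][c]
--
--         for dr, dc in [(-1, 0), (1, 0), (0, -1), (0, 1)]:
--
--             fish += dfs(r + dr, c + dc)
--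
--         return fish
--
--     max_fish = 0
--
--     for r in range(m):
--
--         for c in range(n):
--
--             if grid[r][c] > 0 and not visited[r][c]:
--
--                 max_fish = max(max_fish, dfs(r, c))
--
--     return max_fish
-- ===== SOURCE B (Python) =====
-- def find_max_fish(grid):
--     m, n = len(grid), len(grid[0])
--     g = [row[:] for row in grid]
--     best = 0
--     for r in range(m):
--         for c in range(n):
--             if g[r][c] > 0:
--                 total = 0
--                 stack = [(r, c)]
--                 while stack:
--                     i, j = stack.pop()
--                     if 0 <= i < m and 0 <= j < n and g[i][j] != 0:
--                         total += g[i][j]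
--                         g[i][j] = 0
--                         stack.extend([(i, j + 1), (i, j - 1), (i + 1, j), (i - 1, j)])
--                 if total > best:
--                     best = total
--     return best
-- ===== Notes on version B (the rewrite author's own statement) =====
-- stated objective: alternative
-- what changed: the recursive dfs over a separate visited matrix is replaced by an iterative explicit-stack flood fill that marks cells by zeroing a scratch copy of the grid, so recursion and the visited structure both disappear
import Mathlib
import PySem

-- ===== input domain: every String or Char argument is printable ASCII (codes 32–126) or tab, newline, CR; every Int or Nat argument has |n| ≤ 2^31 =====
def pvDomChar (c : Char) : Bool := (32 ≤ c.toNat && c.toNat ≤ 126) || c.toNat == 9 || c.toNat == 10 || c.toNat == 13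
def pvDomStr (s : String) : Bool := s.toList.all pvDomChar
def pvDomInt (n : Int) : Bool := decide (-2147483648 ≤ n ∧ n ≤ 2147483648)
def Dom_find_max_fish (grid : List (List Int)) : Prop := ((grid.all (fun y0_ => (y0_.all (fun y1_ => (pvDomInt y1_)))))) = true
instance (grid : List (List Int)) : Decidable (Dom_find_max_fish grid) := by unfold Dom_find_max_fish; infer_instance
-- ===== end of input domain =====

-- B replaces A's recursive dfs over a separate visited matrix by an iterative explicit-stack
-- flood fill that marks cells by zeroing a scratch copy of the grid (no visited structure);
-- equivalence of the RETURN value is proved (neither Python mutates its argument).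

-- ===== PORT A =====
-- cell helpers of A: all accesses are guarded 0 ≤ r < m, 0 ≤ c < n in the Python,
-- so .toNat never clamps a negative index on an actual access
def getCell (grid : List (List Int)) (r c : Int) : Int :=
  (grid.getD r.toNat []).getD c.toNat 0

def getVis (vis : List (List Bool)) (r c : Int) : Bool :=
  (vis.getD r.toNat []).getD c.toNat false

def setVis (vis : List (List Bool)) (r c : Int) : List (List Bool) :=
  vis.set r.toNat ((vis.getD r.toNat []).set c.toNat true)

-- A's recursive dfs; fuel (> number of unvisited cells) only bounds the recursion depth,
-- it is never exhausted on the fuel the top level supplies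
def dfsA (grid : List (List Int)) (m n : Int) : Nat → Int → Int → List (List Bool) → Int × List (List Bool)
  | 0, _, _, vis => (0, vis)
  | fuel + 1, r, c, vis =>
    if r < 0 ∨ r ≥ m ∨ c < 0 ∨ c ≥ n then (0, vis)
    else if getVis vis r c = true ∨ getCell grid r c = 0 then (0, vis)
    else
      [((-1 : Int), (0 : Int)), (1, 0), (0, -1), (0, 1)].foldl
        (fun (st : Int × List (List Bool)) (d : Int × Int) =>
          let p := dfsA grid m n fuel (r + d.1) (c + d.2) st.2
          (st.1 + p.1, p.2))
        (getCell grid r c, setVis vis r c)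

def cellA (grid : List (List Int)) (m n : Int) (fuel : Nat) (r : Int)
    (st : Int × List (List Bool)) (c : Int) : Int × List (List Bool) :=
  if getCell grid r c > 0 ∧ getVis st.2 r c = false then
    let p := dfsA grid m n fuel r c st.2
    (max st.1 p.1, p.2)
  else st

def find_max_fish (grid : List (List Int)) : Int :=
  let mN := grid.length
  let nN := (grid.headD []).length
  let vis0 := List.replicate mN (List.replicate nN false)
  let fuel := mN * nN + 1
  ((PySem.List.pyRange 0 (mN : Int) 1).foldl
    (fun st r => (PySem.List.pyRange 0 (nN : Int) 1).foldl (cellA grid mN nN fuel r) st)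
    ((0 : Int), vis0)).1

-- ===== PORT B =====
-- B's cell read / cell zeroing on the scratch grid (in the Python every access is guarded
-- by 0 ≤ i < m and 0 ≤ j < n in the same condition, so .toNat never clamps)
def ggetB (g : List (List Int)) (i j : Int) : Int :=
  (g.getD i.toNat []).getD j.toNat 0

def gzeroB (g : List (List Int)) (i j : Int) : List (List Int) :=
  g.set i.toNat ((g.getD i.toNat []).set j.toNat 0)

-- B's while-loop over the explicit stack; fuel (> pops that can ever happen for one seed)
-- is never exhausted on the fuel the top level supplies
def floodB (m n : Int) : Nat → List (Int × Int) → List (List Int) → Int → Int × List (List Int)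
  | _, [], g, total => (total, g)
  | 0, _ :: _, g, total => (total, g)
  | fuel + 1, (i, j) :: st, g, total =>
    if 0 ≤ i ∧ i < m ∧ 0 ≤ j ∧ j < n ∧ ggetB g i j ≠ 0 then
      floodB m n fuel ((i - 1, j) :: (i + 1, j) :: (i, j - 1) :: (i, j + 1) :: st)
        (gzeroB g i j) (total + ggetB g i j)
    else floodB m n fuel st g total

-- B's two for-loops, written as structural recursion over the range lists
def scanColsB (m n : Int) (fuel : Nat) (r : Int) : List Int → Int × List (List Int) → Int × List (List Int)
  | [], st => st
  | c :: cs, (best, g) =>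
    if ggetB g r c > 0 then
      let p := floodB m n fuel [(r, c)] g 0
      scanColsB m n fuel r cs ((if p.1 > best then p.1 else best), p.2)
    else scanColsB m n fuel r cs (best, g)

def scanRowsB (m n : Int) (fuel : Nat) : List Int → Int × List (List Int) → Int × List (List Int)
  | [], st => st
  | r :: rs, st => scanRowsB m n fuel rs (scanColsB m n fuel r (PySem.List.pyRange 0 n 1) st)

def find_max_fish_alt (grid : List (List Int)) : Int :=
  let mN := grid.length
  let nN := (grid.headD []).length
  let g0 := grid.map (fun row => row)   -- [row[:] for row in grid]
  let fuel := 4 * (mN * nN) + 1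
  (scanRowsB (mN : Int) (nN : Int) fuel (PySem.List.pyRange 0 (mN : Int) 1) ((0 : Int), g0)).1

-- ===== PRECONDITION & SPEC =====
-- Pre_ excludes exactly the inputs where Python A raises IndexError: the empty grid
-- (len(grid[0])) and ragged grids whose some row is shorter than row 0
def Pre_find_max_fish (grid : List (List Int)) : Prop :=
  grid ≠ [] ∧ ∀ row ∈ grid, (grid.headD []).length ≤ row.length
instance (grid : List (List Int)) : Decidable (Pre_find_max_fish grid) := by
  unfold Pre_find_max_fish; infer_instance

def pvWitness_find_max_fish : List (List Int) := [[1, 0, 3], [0, 2, 0]]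

def Spec_find_max_fish (grid : List (List Int)) (out : Int) : Prop := out = find_max_fish_alt grid
instance (grid : List (List Int)) (out : Int) : Decidable (Spec_find_max_fish grid out) := by
  unfold Spec_find_max_fish; infer_instance

-- ===== CLAIM (what is proved, stated in full; the proofs are below) =====
def Claim_equal_find_max_fish : Prop := ∀ (grid : List (List Int)), Dom_find_max_fish grid → Pre_find_max_fish grid → Spec_find_max_fish grid (find_max_fish grid)

-- ===== LEMMAS AND PROOFS =====

-- shape invariant of the visited matrix
def S (mN nN : Nat) (vis : List (List Bool)) : Prop :=
  vis.length = mN ∧ ∀ row ∈ vis, row.length = nN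

-- number of unvisited cells
def uv (vis : List (List Bool)) : Nat := (vis.map (fun row => row.count false)).sum

-- the scratch grid B works on, as a function of A's visited matrix: visited cells are 0
def maskRow (row : List Int) (vrow : List Bool) : List Int :=
  (List.zipWith (fun x b => if b then (0 : Int) else x) row vrow) ++ row.drop vrow.length

def mask (grid : List (List Int)) (vis : List (List Bool)) : List (List Int) :=
  List.zipWith maskRow grid vis

lemma count_set_true_le : ∀ (row : List Bool) (c : Nat), (row.set c true).count false ≤ row.count false := by
  intro row
  induction row with
  | nil => intro c; simp
  | cons b t ih =>
    intro c
    cases c with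
    | zero => cases b <;> simp
    | succ c => have := ih c; cases b <;> simp <;> omega

lemma count_set_true_lt : ∀ (row : List Bool) (c : Nat), c < row.length → row.getD c false = false →
    (row.set c true).count false + 1 ≤ row.count false := by
  intro row
  induction row with
  | nil => intro c h; simp at h
  | cons b t ih =>
    intro c hc hg
    cases c with
    | zero => simp at hg; subst hg; simp
    | succ c =>
      simp at hc hg
      have := ih c hc hg
      cases b <;> simp <;> omega

lemma uv_cons (row : List Bool) (vis : List (List Bool)) : uv (row :: vis) = row.count false + uv vis := by
  simp [uv]

lemma uv_set_le : ∀ (vis : List (List Bool)) (i : Nat) (row' : List Bool),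
    row'.count false ≤ (vis.getD i []).count false → uv (vis.set i row') ≤ uv vis := by
  intro vis
  induction vis with
  | nil => intro i row' h; simp
  | cons h t ih =>
    intro i row' hle
    cases i with
    | zero => simp at hle; simp [List.set, uv_cons]; omega
    | succ i => simp at hle; simp [List.set, uv_cons]; have := ih i row' hle; omega

lemma uv_set_lt : ∀ (vis : List (List Bool)) (i : Nat) (row' : List Bool), i < vis.length →
    row'.count false + 1 ≤ (vis.getD i []).count false → uv (vis.set i row') + 1 ≤ uv vis := by
  intro vis
  induction vis with
  | nil => intro i row' h; simp at h
  | cons h t ih =>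
    intro i row' hi hle
    cases i with
    | zero => simp at hle; simp [List.set, uv_cons]; omega
    | succ i =>
      simp at hle hi
      simp [List.set, uv_cons]
      have := ih i row' hi hle; omega

lemma setVis_uv_le (vis : List (List Bool)) (r c : Int) : uv (setVis vis r c) ≤ uv vis :=
  uv_set_le vis r.toNat _ (count_set_true_le _ _)

lemma getD_row_length {mN nN : Nat} {vis : List (List Bool)} (hS : S mN nN vis) {i : Nat}
    (hi : i < vis.length) : (vis.getD i []).length = nN := by
  rw [List.getD_eq_getElem _ _ hi]
  exact hS.2 _ (List.getElem_mem hi)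

lemma setVis_uv_lt {mN nN : Nat} {vis : List (List Bool)} {r c : Int} (hS : S mN nN vis)
    (hr : 0 ≤ r) (hr2 : r < (mN : Int)) (hc : 0 ≤ c) (hc2 : c < (nN : Int))
    (hv : getVis vis r c = false) : uv (setVis vis r c) + 1 ≤ uv vis := by
  have h1 := hS.1
  have hi : r.toNat < vis.length := by omega
  have hrow : (vis.getD r.toNat []).length = nN := getD_row_length hS hi
  have hcn : c.toNat < (vis.getD r.toNat []).length := by rw [hrow]; omega
  exact uv_set_lt vis r.toNat _ hi (count_set_true_lt _ _ hcn hv)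

lemma setVis_S {mN nN : Nat} {vis : List (List Bool)} {r c : Int} (hS : S mN nN vis)
    (hr : 0 ≤ r) (hr2 : r < (mN : Int)) : S mN nN (setVis vis r c) := by
  have h1 := hS.1
  have hi : r.toNat < vis.length := by omega
  constructor
  · simpa [setVis] using hS.1
  · intro row hmem
    rcases List.mem_or_eq_of_mem_set hmem with h | h
    · exact hS.2 _ h
    · subst h
      simpa using getD_row_length hS hi

lemma uv_le_size {mN nN : Nat} {vis : List (List Bool)} (hS : S mN nN vis) : uv vis ≤ mN * nN := by
  have h := List.sum_le_card_nsmul (vis.map (fun row => row.count false)) nN ?_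
  · simpa [uv, hS.1, smul_eq_mul] using h
  · intro x hx
    simp at hx
    obtain ⟨row, hrow, rfl⟩ := hx
    calc row.count false ≤ row.length := List.count_le_length
    _ = nN := hS.2 _ hrow

lemma dfsA_succ (grid : List (List Int)) (m n : Int) (fuel : Nat) (r c : Int) (vis : List (List Bool))
    (h1 : ¬(r < 0 ∨ r ≥ m ∨ c < 0 ∨ c ≥ n)) (h2 : ¬(getVis vis r c = true ∨ getCell grid r c = 0)) :
    dfsA grid m n (fuel + 1) r c vis =
      (let p1 := dfsA grid m n fuel (r - 1) c (setVis vis r c)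
       let p2 := dfsA grid m n fuel (r + 1) c p1.2
       let p3 := dfsA grid m n fuel r (c - 1) p2.2
       let p4 := dfsA grid m n fuel r (c + 1) p3.2
       (getCell grid r c + p1.1 + p2.1 + p3.1 + p4.1, p4.2)) := by
  simp only [dfsA, if_neg h1, if_neg h2, List.foldl, sub_eq_add_neg, add_zero]

lemma dfsA_S_uv (grid : List (List Int)) (mN nN : Nat) : ∀ (fuel : Nat) (r c : Int) (vis : List (List Bool)),
    S mN nN vis →
    S mN nN (dfsA grid (mN : Int) (nN : Int) fuel r c vis).2 ∧
      uv (dfsA grid (mN : Int) (nN : Int) fuel r c vis).2 ≤ uv vis := by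
  intro fuel
  induction fuel with
  | zero => intro r c vis hS; exact ⟨hS, le_refl _⟩
  | succ fuel ih =>
    intro r c vis hS
    by_cases h1 : r < 0 ∨ r ≥ (mN : Int) ∨ c < 0 ∨ c ≥ (nN : Int)
    · simp only [dfsA, if_pos h1]; exact ⟨hS, le_refl _⟩
    · by_cases h2 : getVis vis r c = true ∨ getCell grid r c = 0
      · simp only [dfsA, if_neg h1, if_pos h2]; exact ⟨hS, le_refl _⟩
      · rw [dfsA_succ _ _ _ _ _ _ _ h1 h2]
        dsimp only
        push Not at h1
        have hS1 : S mN nN (setVis vis r c) := setVis_S hS h1.1 h1.2.1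
        have huv1 : uv (setVis vis r c) ≤ uv vis := setVis_uv_le vis r c
        obtain ⟨hS2, huv2⟩ := ih (r - 1) c _ hS1
        obtain ⟨hS3, huv3⟩ := ih (r + 1) c _ hS2
        obtain ⟨hS4, huv4⟩ := ih r (c - 1) _ hS3
        obtain ⟨hS5, huv5⟩ := ih r (c + 1) _ hS4
        exact ⟨hS5, by omega⟩

-- mask bridge lemmas
lemma maskRow_replicate_false : ∀ (row : List Int) (n : Nat), n ≤ row.length →
    maskRow row (List.replicate n false) = row := by
  intro row
  induction row with
  | nil => intro n h; simp at h; subst h; simp [maskRow]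
  | cons x xs ih =>
    intro n h
    cases n with
    | zero => simp [maskRow]
    | succ n =>
      simp at h
      simp [maskRow, List.replicate_succ]
      simpa [maskRow] using ih n h

lemma mask_replicate_false : ∀ (grid : List (List Int)) (n : Nat),
    (∀ row ∈ grid, n ≤ row.length) →
    mask grid (List.replicate grid.length (List.replicate n false)) = grid := by
  intro grid
  induction grid with
  | nil => intro n h; simp [mask]
  | cons row t ih =>
    intro n h
    simp [mask, List.replicate_succ]
    constructor
    · exact maskRow_replicate_false row n (h row (by simp))
    · simpa [mask] using ih n (fun r hr => h r (by simp [hr]))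

lemma mask_getD {grid : List (List Int)} {vis : List (List Bool)} (hlen : vis.length = grid.length)
    {i : Nat} (hi : i < vis.length) :
    (mask grid vis).getD i [] = maskRow (grid.getD i []) (vis.getD i []) := by
  have hig : i < grid.length := by omega
  have hmi : i < (mask grid vis).length := by simp [mask]; omega
  rw [List.getD_eq_getElem _ _ hmi, List.getD_eq_getElem _ _ hi, List.getD_eq_getElem _ _ hig]
  simp [mask]

lemma mask_set : ∀ (grid : List (List Int)) (vis : List (List Bool)) (i : Nat) (vrow : List Bool),
    i < vis.length →
    (mask grid vis).set i (maskRow (grid.getD i []) vrow) = mask grid (vis.set i vrow) := by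
  intro grid
  induction grid with
  | nil => intro vis i vrow h; simp [mask]
  | cons row t ih =>
    intro vis i vrow h
    cases vis with
    | nil => simp at h
    | cons v vt =>
      cases i with
      | zero => simp [mask]
      | succ i =>
        simp at h
        simp [mask]
        simpa [mask] using ih vt i vrow h

lemma zipWith_set_mask : ∀ (row : List Int) (vrow : List Bool) (j : Nat), j < vrow.length →
    (List.zipWith (fun x b => if b then (0 : Int) else x) row vrow).set j 0
      = List.zipWith (fun x b => if b then (0 : Int) else x) row (vrow.set j true) := by
  intro row
  induction row with
  | nil => intro vrow j h; simp
  | cons x xs ih =>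
    intro vrow j h
    cases vrow with
    | nil => simp at h
    | cons b bt =>
      cases j with
      | zero => simp
      | succ j => simp at h; simp [ih bt j h]

lemma maskRow_set {row : List Int} {vrow : List Bool} {j : Nat} (hj : j < vrow.length)
    (hle : vrow.length ≤ row.length) :
    (maskRow row vrow).set j 0 = maskRow row (vrow.set j true) := by
  unfold maskRow
  have hz : j < (List.zipWith (fun x b => if b then (0 : Int) else x) row vrow).length := by
    simp; omega
  rw [List.set_append_left _ _ hz, zipWith_set_mask row vrow j hj]
  simp

lemma maskRow_getD {row : List Int} {vrow : List Bool} {j : Nat} (hj : j < vrow.length)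
    (hle : vrow.length ≤ row.length) :
    (maskRow row vrow).getD j 0 = if vrow.getD j false then 0 else row.getD j 0 := by
  have hz : j < (List.zipWith (fun x b => if b then (0 : Int) else x) row vrow).length := by
    simp; omega
  have hjr : j < row.length := by omega
  rw [maskRow, List.getD_append _ _ _ _ hz, List.getD_eq_getElem _ _ hz,
    List.getD_eq_getElem _ _ hj, List.getD_eq_getElem _ _ hjr]
  simp

lemma gget_mask {mN nN : Nat} {grid : List (List Int)} {vis : List (List Bool)}
    (hS : S mN nN vis) (hgl : grid.length = mN) (hgr : ∀ row ∈ grid, nN ≤ row.length)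
    {i j : Int} (hi : 0 ≤ i) (hi2 : i < (mN : Int)) (hj : 0 ≤ j) (hj2 : j < (nN : Int)) :
    ggetB (mask grid vis) i j = if getVis vis i j then 0 else getCell grid i j := by
  have hl := hS.1
  have hiv : i.toNat < vis.length := by omega
  have hig : i.toNat < grid.length := by omega
  have hvl : (vis.getD i.toNat []).length = nN := getD_row_length hS hiv
  have hrl : nN ≤ (grid.getD i.toNat []).length := by
    rw [List.getD_eq_getElem _ _ hig]
    exact hgr _ (List.getElem_mem hig)
  have hjv : j.toNat < (vis.getD i.toNat []).length := by omega
  rw [ggetB, mask_getD (by omega) hiv, maskRow_getD hjv (by omega)]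
  rfl

lemma gzero_mask {mN nN : Nat} {grid : List (List Int)} {vis : List (List Bool)}
    (hS : S mN nN vis) (hgl : grid.length = mN) (hgr : ∀ row ∈ grid, nN ≤ row.length)
    {i j : Int} (hi : 0 ≤ i) (hi2 : i < (mN : Int)) (hj : 0 ≤ j) (hj2 : j < (nN : Int)) :
    gzeroB (mask grid vis) i j = mask grid (setVis vis i j) := by
  have hl := hS.1
  have hiv : i.toNat < vis.length := by omega
  have hig : i.toNat < grid.length := by omega
  have hvl : (vis.getD i.toNat []).length = nN := getD_row_length hS hiv
  have hrl : nN ≤ (grid.getD i.toNat []).length := by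
    rw [List.getD_eq_getElem _ _ hig]
    exact hgr _ (List.getElem_mem hig)
  have hjv : j.toNat < (vis.getD i.toNat []).length := by omega
  rw [gzeroB, mask_getD (by omega) hiv, maskRow_set hjv (by omega), mask_set grid vis _ _ hiv]
  rfl

-- B's loop result does not depend on the (sufficient) fuel
lemma floodB_stable (grid : List (List Int)) (mN nN : Nat)
    (hgl : grid.length = mN) (hgr : ∀ row ∈ grid, nN ≤ row.length) :
    ∀ (f : Nat) (st : List (Int × Int)) (vis : List (List Bool)) (acc : Int) (f' : Nat),
    S mN nN vis → st.length + 4 * uv vis ≤ f → st.length + 4 * uv vis ≤ f' →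
    floodB (mN : Int) (nN : Int) f st (mask grid vis) acc
      = floodB (mN : Int) (nN : Int) f' st (mask grid vis) acc := by
  intro f
  induction f with
  | zero =>
    intro st vis acc f' hS hf hf'
    have : st = [] := by cases st <;> simp_all
    subst this
    cases f' <;> simp [floodB]
  | succ f ih =>
    intro st vis acc f' hS hf hf'
    cases st with
    | nil => cases f' <;> simp [floodB]
    | cons p st =>
      obtain ⟨i, j⟩ := p
      simp only [List.length_cons] at hf hf'
      cases f' with
      | zero => omega
      | succ f' =>
        simp only [floodB]
        by_cases hin : 0 ≤ i ∧ i < (mN : Int) ∧ 0 ≤ j ∧ j < (nN : Int)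
        · rw [gget_mask hS hgl hgr hin.1 hin.2.1 hin.2.2.1 hin.2.2.2]
          by_cases hv : getVis vis i j = true
          · have hcond : ¬(0 ≤ i ∧ i < (mN : Int) ∧ 0 ≤ j ∧ j < (nN : Int) ∧
                (if getVis vis i j = true then (0 : Int) else getCell grid i j) ≠ 0) := by
              simp [hv]
            simp only [if_neg hcond]
            exact ih st vis acc f' hS (by omega) (by omega)
          · by_cases hc : getCell grid i j = 0
            · have hcond : ¬(0 ≤ i ∧ i < (mN : Int) ∧ 0 ≤ j ∧ j < (nN : Int) ∧
                  (if getVis vis i j = true then (0 : Int) else getCell grid i j) ≠ 0) := by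
                simp [hv, hc]
              simp only [if_neg hcond]
              exact ih st vis acc f' hS (by omega) (by omega)
            · have hcond : 0 ≤ i ∧ i < (mN : Int) ∧ 0 ≤ j ∧ j < (nN : Int) ∧
                  (if getVis vis i j = true then (0 : Int) else getCell grid i j) ≠ 0 := by
                refine ⟨hin.1, hin.2.1, hin.2.2.1, hin.2.2.2, ?_⟩
                simp [hv, hc]
              rw [if_pos hcond, if_pos hcond, if_neg hv,
                gzero_mask hS hgl hgr hin.1 hin.2.1 hin.2.2.1 hin.2.2.2]
              have hlt : uv (setVis vis i j) + 1 ≤ uv vis :=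
                setVis_uv_lt hS hin.1 hin.2.1 hin.2.2.1 hin.2.2.2 (by simpa using hv)
              have hS1 : S mN nN (setVis vis i j) := setVis_S hS hin.1 hin.2.1
              exact ih _ _ _ f' hS1 (by simp only [List.length_cons]; omega)
                (by simp only [List.length_cons]; omega)
        · have hcond : ¬(0 ≤ i ∧ i < (mN : Int) ∧ 0 ≤ j ∧ j < (nN : Int) ∧
              ggetB (mask grid vis) i j ≠ 0) := by tauto
          simp only [if_neg hcond]
          exact ih st vis acc f' hS (by omega) (by omega)

-- the simulation: popping (r,c) from B's stack produces exactly A's dfs(r,c)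
lemma sim (grid : List (List Int)) (mN nN : Nat)
    (hgl : grid.length = mN) (hgr : ∀ row ∈ grid, nN ≤ row.length) :
    ∀ (k : Nat) (vis : List (List Bool)), uv vis ≤ k →
    ∀ (r c : Int) (st : List (Int × Int)) (acc : Int) (fA fL fL' : Nat),
    S mN nN vis → uv vis < fA →
    st.length + 1 + 4 * uv vis ≤ fL →
    st.length + 4 * uv (dfsA grid (mN : Int) (nN : Int) fA r c vis).2 ≤ fL' →
    floodB (mN : Int) (nN : Int) fL ((r, c) :: st) (mask grid vis) acc =
      floodB (mN : Int) (nN : Int) fL' st (mask grid (dfsA grid (mN : Int) (nN : Int) fA r c vis).2)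
        (acc + (dfsA grid (mN : Int) (nN : Int) fA r c vis).1) := by
  intro k
  induction k with
  | zero =>
    intro vis hk r c st acc fA fL fL' hS hfA hfL hfL'
    cases fA with
    | zero => omega
    | succ a =>
      cases fL with
      | zero => omega
      | succ g =>
        simp only [floodB]
        by_cases h1 : r < 0 ∨ r ≥ (mN : Int) ∨ c < 0 ∨ c ≥ (nN : Int)
        · have hd : dfsA grid (mN : Int) (nN : Int) (a + 1) r c vis = (0, vis) := by
            simp only [dfsA, if_pos h1]
          rw [hd] at hfL' ⊢
          rw [if_neg (by rintro ⟨a1, a2, a3, a4, -⟩; rcases h1 with h | h | h | h <;> omega)]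
          simp only [add_zero]
          exact floodB_stable grid mN nN hgl hgr g st vis acc fL' hS (by omega) (by simpa using hfL')
        · have h1' : 0 ≤ r ∧ r < (mN : Int) ∧ 0 ≤ c ∧ c < (nN : Int) := by omega
          by_cases h2 : getVis vis r c = true ∨ getCell grid r c = 0
          · have hd : dfsA grid (mN : Int) (nN : Int) (a + 1) r c vis = (0, vis) := by
              simp only [dfsA]
              rw [if_neg h1, if_pos h2]
            rw [hd] at hfL' ⊢
            rw [gget_mask hS hgl hgr h1'.1 h1'.2.1 h1'.2.2.1 h1'.2.2.2]
            rw [if_neg (by rintro ⟨-, -, -, -, hne⟩; rcases h2 with h | h <;> simp [h] at hne)]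
            simp only [add_zero]
            exact floodB_stable grid mN nN hgl hgr g st vis acc fL' hS (by omega) (by simpa using hfL')
          · push Not at h2
            have hlt : uv (setVis vis r c) + 1 ≤ uv vis :=
              setVis_uv_lt hS h1'.1 h1'.2.1 h1'.2.2.1 h1'.2.2.2 (by simpa using h2.1)
            omega
  | succ k ih =>
    intro vis hk r c st acc fA fL fL' hS hfA hfL hfL'
    cases fA with
    | zero => omega
    | succ a =>
      cases fL with
      | zero => omega
      | succ g =>
        simp only [floodB]
        by_cases h1 : r < 0 ∨ r ≥ (mN : Int) ∨ c < 0 ∨ c ≥ (nN : Int)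
        · have hd : dfsA grid (mN : Int) (nN : Int) (a + 1) r c vis = (0, vis) := by
            simp only [dfsA, if_pos h1]
          rw [hd] at hfL' ⊢
          rw [if_neg (by rintro ⟨a1, a2, a3, a4, -⟩; rcases h1 with h | h | h | h <;> omega)]
          simp only [add_zero]
          exact floodB_stable grid mN nN hgl hgr g st vis acc fL' hS (by omega) (by simpa using hfL')
        · have h1' : 0 ≤ r ∧ r < (mN : Int) ∧ 0 ≤ c ∧ c < (nN : Int) := by omega
          by_cases h2 : getVis vis r c = true ∨ getCell grid r c = 0
          · have hd : dfsA grid (mN : Int) (nN : Int) (a + 1) r c vis = (0, vis) := by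
              simp only [dfsA]
              rw [if_neg h1, if_pos h2]
            rw [hd] at hfL' ⊢
            rw [gget_mask hS hgl hgr h1'.1 h1'.2.1 h1'.2.2.1 h1'.2.2.2]
            rw [if_neg (by rintro ⟨-, -, -, -, hne⟩; rcases h2 with h | h <;> simp [h] at hne)]
            simp only [add_zero]
            exact floodB_stable grid mN nN hgl hgr g st vis acc fL' hS (by omega) (by simpa using hfL')
          · have hne2 := h2
            push Not at h2
            have hvv : getVis vis r c = false := by simpa using h2.1
            rw [gget_mask hS hgl hgr h1'.1 h1'.2.1 h1'.2.2.1 h1'.2.2.2]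
            have hcond : 0 ≤ r ∧ r < (mN : Int) ∧ 0 ≤ c ∧ c < (nN : Int) ∧
                (if getVis vis r c = true then (0 : Int) else getCell grid r c) ≠ 0 := by
              refine ⟨h1'.1, h1'.2.1, h1'.2.2.1, h1'.2.2.2, ?_⟩
              simp [hvv]; exact h2.2
            rw [if_pos hcond, if_neg h2.1,
              gzero_mask hS hgl hgr h1'.1 h1'.2.1 h1'.2.2.1 h1'.2.2.2]
            rw [dfsA_succ _ _ _ _ _ _ _ h1 hne2] at hfL' ⊢
            dsimp only at hfL' ⊢
            have hlt : uv (setVis vis r c) + 1 ≤ uv vis :=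
              setVis_uv_lt hS h1'.1 h1'.2.1 h1'.2.2.1 h1'.2.2.2 hvv
            have hS1 : S mN nN (setVis vis r c) := setVis_S hS h1'.1 h1'.2.1
            obtain ⟨hS2, huv2⟩ := dfsA_S_uv grid mN nN a (r - 1) c _ hS1
            obtain ⟨hS3, huv3⟩ := dfsA_S_uv grid mN nN a (r + 1) c _ hS2
            obtain ⟨hS4, huv4⟩ := dfsA_S_uv grid mN nN a r (c - 1) _ hS3
            obtain ⟨hS5, huv5⟩ := dfsA_S_uv grid mN nN a r (c + 1) _ hS4
            rw [ih (setVis vis r c) (by omega) (r - 1) c ((r + 1, c) :: (r, c - 1) :: (r, c + 1) :: st) (acc + getCell grid r c) a g g hS1 (by omega) (by simp only [List.length_cons]; omega) (by simp only [List.length_cons]; omega)]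
            rw [ih (dfsA grid (mN : Int) (nN : Int) a (r - 1) c (setVis vis r c)).2 (by omega) (r + 1) c ((r, c - 1) :: (r, c + 1) :: st) (acc + getCell grid r c + (dfsA grid (mN : Int) (nN : Int) a (r - 1) c (setVis vis r c)).1) a g g hS2 (by omega) (by simp only [List.length_cons]; omega) (by simp only [List.length_cons]; omega)]
            rw [ih (dfsA grid (mN : Int) (nN : Int) a (r + 1) c (dfsA grid (mN : Int) (nN : Int) a (r - 1) c (setVis vis r c)).2).2 (by omega) r (c - 1) ((r, c + 1) :: st) (acc + getCell grid r c + (dfsA grid (mN : Int) (nN : Int) a (r - 1) c (setVis vis r c)).1 + (dfsA grid (mN : Int) (nN : Int) a (r + 1) c (dfsA grid (mN : Int) (nN : Int) a (r - 1) c (setVis vis r c)).2).1) a g g hS3 (by omega) (by simp only [List.length_cons]; omega) (by simp only [List.length_cons]; omega)]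
            rw [ih (dfsA grid (mN : Int) (nN : Int) a r (c - 1) (dfsA grid (mN : Int) (nN : Int) a (r + 1) c (dfsA grid (mN : Int) (nN : Int) a (r - 1) c (setVis vis r c)).2).2).2 (by omega) r (c + 1) st (acc + getCell grid r c + (dfsA grid (mN : Int) (nN : Int) a (r - 1) c (setVis vis r c)).1 + (dfsA grid (mN : Int) (nN : Int) a (r + 1) c (dfsA grid (mN : Int) (nN : Int) a (r - 1) c (setVis vis r c)).2).1 + (dfsA grid (mN : Int) (nN : Int) a r (c - 1) (dfsA grid (mN : Int) (nN : Int) a (r + 1) c (dfsA grid (mN : Int) (nN : Int) a (r - 1) c (setVis vis r c)).2).2).1) a g g hS4 (by omega) (by omega) (by omega)]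
            rw [show acc + getCell grid r c +
                (dfsA grid (mN : Int) (nN : Int) a (r - 1) c (setVis vis r c)).1 +
                (dfsA grid (mN : Int) (nN : Int) a (r + 1) c
                  (dfsA grid (mN : Int) (nN : Int) a (r - 1) c (setVis vis r c)).2).1 +
                (dfsA grid (mN : Int) (nN : Int) a r (c - 1)
                  (dfsA grid (mN : Int) (nN : Int) a (r + 1) c
                    (dfsA grid (mN : Int) (nN : Int) a (r - 1) c (setVis vis r c)).2).2).1 +
                (dfsA grid (mN : Int) (nN : Int) a r (c + 1)
                  (dfsA grid (mN : Int) (nN : Int) a r (c - 1)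
                    (dfsA grid (mN : Int) (nN : Int) a (r + 1) c
                      (dfsA grid (mN : Int) (nN : Int) a (r - 1) c (setVis vis r c)).2).2).2).1 =
              acc + (getCell grid r c +
                (dfsA grid (mN : Int) (nN : Int) a (r - 1) c (setVis vis r c)).1 +
                (dfsA grid (mN : Int) (nN : Int) a (r + 1) c
                  (dfsA grid (mN : Int) (nN : Int) a (r - 1) c (setVis vis r c)).2).1 +
                (dfsA grid (mN : Int) (nN : Int) a r (c - 1)
                  (dfsA grid (mN : Int) (nN : Int) a (r + 1) c
                    (dfsA grid (mN : Int) (nN : Int) a (r - 1) c (setVis vis r c)).2).2).1 +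
                (dfsA grid (mN : Int) (nN : Int) a r (c + 1)
                  (dfsA grid (mN : Int) (nN : Int) a r (c - 1)
                    (dfsA grid (mN : Int) (nN : Int) a (r + 1) c
                      (dfsA grid (mN : Int) (nN : Int) a (r - 1) c (setVis vis r c)).2).2).2).1) from by ring]
            exact floodB_stable grid mN nN hgl hgr g st _ _ fL' hS5 (by omega) (by omega)

lemma inner_eq (grid : List (List Int)) (mN nN : Nat)
    (hgl : grid.length = mN) (hgr : ∀ row ∈ grid, nN ≤ row.length) (r : Int)
    (hr : 0 ≤ r ∧ r < (mN : Int)) :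
    ∀ (cs : List Int) (best : Int) (vis : List (List Bool)),
    S mN nN vis → (∀ c ∈ cs, 0 ≤ c ∧ c < (nN : Int)) →
    scanColsB (mN : Int) (nN : Int) (4 * (mN * nN) + 1) r cs (best, mask grid vis)
        = ((cs.foldl (cellA grid (mN : Int) (nN : Int) (mN * nN + 1) r) (best, vis)).1,
           mask grid (cs.foldl (cellA grid (mN : Int) (nN : Int) (mN * nN + 1) r) (best, vis)).2) ∧
      S mN nN (cs.foldl (cellA grid (mN : Int) (nN : Int) (mN * nN + 1) r) (best, vis)).2 := by
  intro cs
  induction cs with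
  | nil => intro best vis hS _; exact ⟨rfl, hS⟩
  | cons c cs ihc =>
    intro best vis hS hmem
    obtain ⟨hc1, hc2⟩ := hmem c (by simp)
    have hmem' : ∀ c' ∈ cs, 0 ≤ c' ∧ c' < (nN : Int) := fun c' hc' => hmem c' (by simp [hc'])
    simp only [List.foldl_cons, scanColsB]
    rw [gget_mask hS hgl hgr hr.1 hr.2 hc1 hc2]
    by_cases hg : getCell grid r c > 0 ∧ getVis vis r c = false
    · have hcond : (if getVis vis r c then (0 : Int) else getCell grid r c) > 0 := by
        simp [hg.2]; exact hg.1
      rw [if_pos hcond]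
      have hb : uv vis ≤ mN * nN := uv_le_size hS
      obtain ⟨hS', huv'⟩ := dfsA_S_uv grid mN nN (mN * nN + 1) r c vis hS
      have hsim := sim grid mN nN hgl hgr (uv vis) vis (le_refl _) r c [] 0 (mN * nN + 1)
        (4 * (mN * nN) + 1) (4 * (mN * nN) + 1) hS (by omega)
        (by simp only [List.length_nil]; omega) (by simp only [List.length_nil]; omega)
      rw [hsim]
      simp only [floodB, zero_add]
      have hmax : (if (dfsA grid (mN : Int) (nN : Int) (mN * nN + 1) r c vis).1 > best then
          (dfsA grid (mN : Int) (nN : Int) (mN * nN + 1) r c vis).1 else best)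
          = max best (dfsA grid (mN : Int) (nN : Int) (mN * nN + 1) r c vis).1 := by
        rw [max_def]; split_ifs <;> omega
      rw [hmax]
      have := ihc (max best (dfsA grid (mN : Int) (nN : Int) (mN * nN + 1) r c vis).1)
        (dfsA grid (mN : Int) (nN : Int) (mN * nN + 1) r c vis).2 hS' hmem'
      simpa [cellA, if_pos hg] using this
    · have hcond : ¬((if getVis vis r c then (0 : Int) else getCell grid r c) > 0) := by
        by_cases hv : getVis vis r c
        · simp [hv]
        · have hvf : getVis vis r c = false := by simpa using hv
          have hnp : ¬ getCell grid r c > 0 := fun hp => hg ⟨hp, hvf⟩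
          simp [hvf]; omega
      rw [if_neg hcond]
      have := ihc best vis hS hmem'
      simpa [cellA, if_neg hg] using this

lemma outer_eq (grid : List (List Int)) (mN nN : Nat)
    (hgl : grid.length = mN) (hgr : ∀ row ∈ grid, nN ≤ row.length) :
    ∀ (rs : List Int) (best : Int) (vis : List (List Bool)),
    S mN nN vis → (∀ r ∈ rs, 0 ≤ r ∧ r < (mN : Int)) →
    scanRowsB (mN : Int) (nN : Int) (4 * (mN * nN) + 1) rs (best, mask grid vis)
      = ((rs.foldl (fun st r => (PySem.List.pyRange 0 (nN : Int) 1).foldl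
            (cellA grid (mN : Int) (nN : Int) (mN * nN + 1) r) st) (best, vis)).1,
         mask grid (rs.foldl (fun st r => (PySem.List.pyRange 0 (nN : Int) 1).foldl
            (cellA grid (mN : Int) (nN : Int) (mN * nN + 1) r) st) (best, vis)).2) := by
  intro rs
  induction rs with
  | nil => intro best vis hS _; rfl
  | cons r rs ihr =>
    intro best vis hS hmem
    simp only [List.foldl_cons, scanRowsB]
    have hcmem : ∀ c ∈ PySem.List.pyRange 0 (nN : Int) 1, 0 ≤ c ∧ c < (nN : Int) := by
      intro c hc
      exact (PySem.List.mem_pyRange_one).1 hc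
    obtain ⟨heq, hS'⟩ := inner_eq grid mN nN hgl hgr r (hmem r (by simp))
      (PySem.List.pyRange 0 (nN : Int) 1) best vis hS hcmem
    rw [heq]
    exact ihr _ _ hS' (fun r' hr' => hmem r' (by simp [hr']))

lemma vis0_S (mN nN : Nat) : S mN nN (List.replicate mN (List.replicate nN false)) := by
  constructor
  · simp
  · intro row hmem
    rw [List.eq_of_mem_replicate hmem]
    simp

lemma ports_agree (grid : List (List Int)) (hpre : Pre_find_max_fish grid) :
    find_max_fish grid = find_max_fish_alt grid := by
  unfold find_max_fish find_max_fish_alt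
  have hgr : ∀ row ∈ grid, (grid.headD []).length ≤ row.length := hpre.2
  have hmap : grid.map (fun row => row) = grid := by simp
  rw [hmap]
  have key := outer_eq grid grid.length (grid.headD []).length rfl hgr
    (PySem.List.pyRange 0 (grid.length : Int) 1) 0
    (List.replicate grid.length (List.replicate (grid.headD []).length false))
    (vis0_S _ _) (fun r hr => (PySem.List.mem_pyRange_one).1 hr)
  rw [mask_replicate_false grid (grid.headD []).length hgr] at key
  exact (congrArg Prod.fst key).symm

-- ===== VERDICT (by name: the statement is the Claim_ definition above) =====
theorem find_max_fish_spec : Claim_equal_find_max_fish := by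
  intro grid _ hpre
  unfold Spec_find_max_fish
  exact ports_agree grid hpre
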